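-- pv_equiv track=rewrite | github.com/rayruzzo/dnd_generator | dnd_random_char.py | getAbilityModifiers
-- ===== SOURCE A (Python) =====
-- def getAbilityModifiers(abilityDict):
--     modifierDict = {}
--     for ability, score in abilityDict.items():
--         match score:
--             case 1:
--                 modifierDict[ability] = -5
--             case 2 | 3:
--                 modifierDict[ability] = -4
--             case 4 | 5:
--                 modifierDict[ability] = -3
--             case 6 | 7:
--                 modifierDict[ability] = -2
--             case 8 | 9:
--                 modifierDict[ability] = -1
--             case 10 | 11:
--                 modifierDict[ability] = 0
--             case 12 | 13:
--                 modifierDict[ability] = 1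
--             case 14 | 15:
--                 modifierDict[ability] = 2
--             case 16 | 17:
--                 modifierDict[ability] = 3
--             case 18 | 19:
--                 modifierDict[ability] = 4
--             case 20 | 21:
--                 modifierDict[ability] = 5
--             case 22 | 23:
--                 modifierDict[ability] = 6
--             case 24 | 25:
--                 modifierDict[ability] = 7
--             case 26 | 27:
--                 modifierDict[ability] = 8
--             case 28 | 29:
--                 modifierDict[ability] = 9
--             case _:
--                 modifierDict[ability] = 10
--     return modifierDict
-- ===== SOURCE B (Python) =====
-- def getAbilityModifiers(abilityDict):
--     return {ability: (score - 10) // 2 if 1 <= score <= 29 else 10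
--             for ability, score in abilityDict.items()}
-- ===== Notes on version B (the rewrite author's own statement) =====
-- stated objective: simpler
-- what changed: Replaces the 15-arm match lookup table with the closed-form D&D formula (score - 10) // 2 (floor division), guarded to 1..29 where the table's catch-all yields 10, inside a dict comprehension.
import Mathlib
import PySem

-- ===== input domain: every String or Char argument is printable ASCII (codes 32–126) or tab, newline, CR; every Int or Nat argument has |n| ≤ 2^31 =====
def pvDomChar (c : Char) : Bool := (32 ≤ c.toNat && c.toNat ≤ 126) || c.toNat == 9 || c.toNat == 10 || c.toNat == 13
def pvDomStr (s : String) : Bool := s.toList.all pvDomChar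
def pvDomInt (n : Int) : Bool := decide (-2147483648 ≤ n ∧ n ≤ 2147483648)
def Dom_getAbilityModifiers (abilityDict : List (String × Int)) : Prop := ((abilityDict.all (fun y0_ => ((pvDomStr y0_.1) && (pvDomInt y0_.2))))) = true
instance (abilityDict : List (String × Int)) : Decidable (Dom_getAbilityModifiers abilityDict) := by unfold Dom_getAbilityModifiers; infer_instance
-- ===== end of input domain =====

-- B replaces A's 15-arm match lookup table with the closed-form D&D formula
-- (score - 10) // 2 guarded to 1..29 (else 10), in a dict comprehension; objective: simpler.

-- ===== PORT A =====
-- the 15-arm match on score, branch order as in the Python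
def pvMatchMod (score : Int) : Int :=
  if score = 1 then -5
  else if score = 2 ∨ score = 3 then -4
  else if score = 4 ∨ score = 5 then -3
  else if score = 6 ∨ score = 7 then -2
  else if score = 8 ∨ score = 9 then -1
  else if score = 10 ∨ score = 11 then 0
  else if score = 12 ∨ score = 13 then 1
  else if score = 14 ∨ score = 15 then 2
  else if score = 16 ∨ score = 17 then 3
  else if score = 18 ∨ score = 19 then 4
  else if score = 20 ∨ score = 21 then 5
  else if score = 22 ∨ score = 23 then 6
  else if score = 24 ∨ score = 25 then 7
  else if score = 26 ∨ score = 27 then 8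
  else if score = 28 ∨ score = 29 then 9
  else 10

def getAbilityModifiers (abilityDict : List (String × Int)) : List (String × Int) :=
  (abilityDict.foldl (fun d p => d.insert p.1 (pvMatchMod p.2)) PySem.Dict.empty).items

-- ===== PORT B =====
-- dict comprehension with the closed-form value
def getAbilityModifiers_alt (abilityDict : List (String × Int)) : List (String × Int) :=
  (abilityDict.foldl
    (fun d p =>
      d.insert p.1 (if 1 ≤ p.2 ∧ p.2 ≤ 29 then PySem.Int.floordiv (p.2 - 10) 2 else 10))
    PySem.Dict.empty).items

-- ===== PRECONDITION & SPEC =====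
def Spec_getAbilityModifiers (abilityDict : List (String × Int)) (out : List (String × Int)) : Prop := out = getAbilityModifiers_alt abilityDict
instance (abilityDict : List (String × Int)) (out : List (String × Int)) : Decidable (Spec_getAbilityModifiers abilityDict out) := by unfold Spec_getAbilityModifiers; infer_instance

-- ===== CLAIM (what is proved, stated in full; the proofs are below) =====
def Claim_equal_getAbilityModifiers : Prop := ∀ (abilityDict : List (String × Int)), Dom_getAbilityModifiers abilityDict → Spec_getAbilityModifiers abilityDict (getAbilityModifiers abilityDict)

-- ===== LEMMAS AND PROOFS =====
theorem pvMatchMod_closed (s : Int) :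
    pvMatchMod s = (if 1 ≤ s ∧ s ≤ 29 then PySem.Int.floordiv (s - 10) 2 else 10) := by
  by_cases h : 1 ≤ s ∧ s ≤ 29
  · obtain ⟨h1, h2⟩ := h
    interval_cases s <;> decide
  · rw [if_neg h]
    unfold pvMatchMod
    rw [if_neg (by omega), if_neg (by omega), if_neg (by omega), if_neg (by omega),
        if_neg (by omega), if_neg (by omega), if_neg (by omega), if_neg (by omega),
        if_neg (by omega), if_neg (by omega), if_neg (by omega), if_neg (by omega),
        if_neg (by omega), if_neg (by omega), if_neg (by omega)]

-- ===== VERDICT (by name: the statement is the Claim_ definition above) =====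
theorem getAbilityModifiers_spec : Claim_equal_getAbilityModifiers := by
  intro l _
  show _ = _
  unfold getAbilityModifiers getAbilityModifiers_alt
  congr 2
  funext d p
  rw [pvMatchMod_closed]
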